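-- pv_equiv track=rewrite | github.com/ScientiaCapital/dealer-scraper-mvp | scripts/export_for_sales_agent.py | categorize_oems
-- ===== SOURCE A (Python) =====
-- def categorize_oems(oems_str: str) -> dict:
--     """Categorize OEMs into HVAC, Solar, Battery, Generator, Smart Panel."""
--     if not oems_str:
--         return {
--             'hvac_oems': [],
--             'solar_oems': [],
--             'battery_oems': [],
--             'generator_oems': [],
--             'smart_panel_oems': []
--         }
--
--     oems = [o.strip() for o in oems_str.split(',')]
--
--     # OEM category mappings
--     hvac_brands = {'Carrier', 'Trane', 'York', 'Rheem', 'Mitsubishi', 'Mitsubishi Electric'}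
--     solar_brands = {'Enphase', 'SolarEdge', 'SMA', 'Fronius', 'GoodWe', 'Growatt', 'Sungrow', 'ABB', 'Delta', 'Tigo'}
--     battery_brands = {'Tesla', 'SimpliPhi', 'Sol-Ark', 'SolArk'}
--     generator_brands = {'Generac', 'Briggs & Stratton', 'Cummins', 'Kohler'}
--     smart_panel_brands = {'Schneider Electric', 'Schneider'}
--
--     categorized = {
--         'hvac_oems': [o for o in oems if o in hvac_brands],
--         'solar_oems': [o for o in oems if o in solar_brands],
--         'battery_oems': [o for o in oems if o in battery_brands],
--         'generator_oems': [o for o in oems if o in generator_brands],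
--         'smart_panel_oems': [o for o in oems if o in smart_panel_brands]
--     }
--     return categorized
-- ===== SOURCE B (Python) =====
-- _DISPATCH = {
--     'Carrier': 'hvac_oems', 'Trane': 'hvac_oems', 'York': 'hvac_oems',
--     'Rheem': 'hvac_oems', 'Mitsubishi': 'hvac_oems', 'Mitsubishi Electric': 'hvac_oems',
--     'Enphase': 'solar_oems', 'SolarEdge': 'solar_oems', 'SMA': 'solar_oems',
--     'Fronius': 'solar_oems', 'GoodWe': 'solar_oems', 'Growatt': 'solar_oems',
--     'Sungrow': 'solar_oems', 'ABB': 'solar_oems', 'Delta': 'solar_oems', 'Tigo': 'solar_oems',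
--     'Tesla': 'battery_oems', 'SimpliPhi': 'battery_oems', 'Sol-Ark': 'battery_oems', 'SolArk': 'battery_oems',
--     'Generac': 'generator_oems', 'Briggs & Stratton': 'generator_oems',
--     'Cummins': 'generator_oems', 'Kohler': 'generator_oems',
--     'Schneider Electric': 'smart_panel_oems', 'Schneider': 'smart_panel_oems',
-- }
--
--
-- def categorize_oems(oems_str: str) -> dict:
--     """Single dispatch-table pass instead of five repeated membership scans."""
--     result = {
--         'hvac_oems': [],
--         'solar_oems': [],
--         'battery_oems': [],
--         'generator_oems': [],
--         'smart_panel_oems': []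
--     }
--     if not oems_str:
--         return result
--     for tok in oems_str.split(','):
--         tok = tok.strip()
--         cat = _DISPATCH.get(tok)
--         if cat is not None:
--             result[cat].append(tok)
--     return result
-- ===== Notes on version B (the rewrite author's own statement) =====
-- stated objective: alternative
-- what changed: A filters the token list five times, once per brand set; B builds one inverted brand-to-category dispatch dict and makes a single left-to-right pass over the stripped tokens, appending each recognized token to its category list.
import Mathlib
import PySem

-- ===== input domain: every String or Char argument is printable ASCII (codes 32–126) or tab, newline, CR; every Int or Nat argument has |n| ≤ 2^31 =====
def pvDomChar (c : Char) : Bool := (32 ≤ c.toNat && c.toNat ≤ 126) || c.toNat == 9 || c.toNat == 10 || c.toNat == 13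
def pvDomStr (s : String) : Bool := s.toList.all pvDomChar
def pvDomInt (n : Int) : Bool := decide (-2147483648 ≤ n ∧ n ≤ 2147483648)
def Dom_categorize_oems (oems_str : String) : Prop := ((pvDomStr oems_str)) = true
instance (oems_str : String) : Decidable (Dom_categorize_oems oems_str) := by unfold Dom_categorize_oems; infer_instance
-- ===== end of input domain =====

-- B replaces A's five separate membership scans by one dispatch-table pass (same result; objective: alternative decomposition).

-- ===== PORT A =====
def pvHvacBrands : PySem.Set String :=
  PySem.Set.ofList ["Carrier", "Trane", "York", "Rheem", "Mitsubishi", "Mitsubishi Electric"]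
def pvSolarBrands : PySem.Set String :=
  PySem.Set.ofList ["Enphase", "SolarEdge", "SMA", "Fronius", "GoodWe", "Growatt", "Sungrow", "ABB", "Delta", "Tigo"]
def pvBatteryBrands : PySem.Set String :=
  PySem.Set.ofList ["Tesla", "SimpliPhi", "Sol-Ark", "SolArk"]
def pvGeneratorBrands : PySem.Set String :=
  PySem.Set.ofList ["Generac", "Briggs & Stratton", "Cummins", "Kohler"]
def pvSmartPanelBrands : PySem.Set String :=
  PySem.Set.ofList ["Schneider Electric", "Schneider"]

def categorize_oems (oems_str : String) : List (String × List String) :=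
  if oems_str = "" then
    [("hvac_oems", []), ("solar_oems", []), ("battery_oems", []),
     ("generator_oems", []), ("smart_panel_oems", [])]
  else
    -- s.split(',') with a non-empty separator: PySem.Chars.splitOn is exact here
    let oems := ((PySem.Chars.splitOn oems_str.toList [',']).map String.ofList).map PySem.Str.strip
    [("hvac_oems", oems.filter (fun o => PySem.Set.contains pvHvacBrands o)),
     ("solar_oems", oems.filter (fun o => PySem.Set.contains pvSolarBrands o)),
     ("battery_oems", oems.filter (fun o => PySem.Set.contains pvBatteryBrands o)),
     ("generator_oems", oems.filter (fun o => PySem.Set.contains pvGeneratorBrands o)),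
     ("smart_panel_oems", oems.filter (fun o => PySem.Set.contains pvSmartPanelBrands o))]

-- ===== PORT B =====
def pvDispatch : PySem.Dict String String :=
  PySem.Dict.ofList
    [("Carrier", "hvac_oems"), ("Trane", "hvac_oems"), ("York", "hvac_oems"),
     ("Rheem", "hvac_oems"), ("Mitsubishi", "hvac_oems"), ("Mitsubishi Electric", "hvac_oems"),
     ("Enphase", "solar_oems"), ("SolarEdge", "solar_oems"), ("SMA", "solar_oems"),
     ("Fronius", "solar_oems"), ("GoodWe", "solar_oems"), ("Growatt", "solar_oems"),
     ("Sungrow", "solar_oems"), ("ABB", "solar_oems"), ("Delta", "solar_oems"), ("Tigo", "solar_oems"),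
     ("Tesla", "battery_oems"), ("SimpliPhi", "battery_oems"), ("Sol-Ark", "battery_oems"), ("SolArk", "battery_oems"),
     ("Generac", "generator_oems"), ("Briggs & Stratton", "generator_oems"),
     ("Cummins", "generator_oems"), ("Kohler", "generator_oems"),
     ("Schneider Electric", "smart_panel_oems"), ("Schneider", "smart_panel_oems")]

-- the loop body of Source B: strip the token, look it up, append it to its category's list
def pvStep (d : PySem.Dict String (List String)) (tok0 : String) : PySem.Dict String (List String) :=
  let tok := PySem.Str.strip tok0
  match pvDispatch.get? tok with
  | some cat => d.modify cat [] (fun l => l ++ [tok])   -- result[cat].append(tok); cat is always a key of result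
  | none => d

def categorize_oems_alt (oems_str : String) : List (String × List String) :=
  let result : PySem.Dict String (List String) :=
    PySem.Dict.ofList
      [("hvac_oems", []), ("solar_oems", []), ("battery_oems", []),
       ("generator_oems", []), ("smart_panel_oems", [])]
  if oems_str = "" then result.items
  else
    (((PySem.Chars.splitOn oems_str.toList [',']).map String.ofList).foldl pvStep result).items

-- ===== PRECONDITION & SPEC =====
def Spec_categorize_oems (oems_str : String) (out : List (String × List String)) : Prop := out = categorize_oems_alt oems_str
instance (oems_str : String) (out : List (String × List String)) : Decidable (Spec_categorize_oems oems_str out) := by unfold Spec_categorize_oems; infer_instance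

-- ===== CLAIM (what is proved, stated in full; the proofs are below) =====
def Claim_equal_categorize_oems : Prop := ∀ (oems_str : String), Dom_categorize_oems oems_str → Spec_categorize_oems oems_str (categorize_oems oems_str)

-- ===== LEMMAS AND PROOFS =====
-- the shape of B's accumulator dict (proof helper)
def pvMkD (hs ss bs gs ps : List String) : PySem.Dict String (List String) :=
  PySem.Dict.mk
    [("hvac_oems", hs), ("solar_oems", ss), ("battery_oems", bs),
     ("generator_oems", gs), ("smart_panel_oems", ps)]


-- the 26 dispatch pairs as a plain list (proof helper)
def pvPairs : List (String × String) :=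
  [("Carrier", "hvac_oems"), ("Trane", "hvac_oems"), ("York", "hvac_oems"),
   ("Rheem", "hvac_oems"), ("Mitsubishi", "hvac_oems"), ("Mitsubishi Electric", "hvac_oems"),
   ("Enphase", "solar_oems"), ("SolarEdge", "solar_oems"), ("SMA", "solar_oems"),
   ("Fronius", "solar_oems"), ("GoodWe", "solar_oems"), ("Growatt", "solar_oems"),
   ("Sungrow", "solar_oems"), ("ABB", "solar_oems"), ("Delta", "solar_oems"), ("Tigo", "solar_oems"),
   ("Tesla", "battery_oems"), ("SimpliPhi", "battery_oems"), ("Sol-Ark", "battery_oems"), ("SolArk", "battery_oems"),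
   ("Generac", "generator_oems"), ("Briggs & Stratton", "generator_oems"),
   ("Cummins", "generator_oems"), ("Kohler", "generator_oems"),
   ("Schneider Electric", "smart_panel_oems"), ("Schneider", "smart_panel_oems")]

lemma pvDispatch_eq : pvDispatch = PySem.Dict.mk pvPairs := by decide

-- first-match association lookup against a nodup-keyed pair list = membership in the keys filtered by value
lemma pvFindContains (pairs : List (String × String)) (v cat : String)
    (hnd : (pairs.map Prod.fst).Nodup) :
    ((pairs.find? (fun p => p.1 == v)).map Prod.snd == some cat) =
    ((pairs.filter (fun p => p.2 == cat)).map Prod.fst).contains v := by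
  induction pairs with
  | nil => simp
  | cons p rest ih =>
    obtain ⟨k, c⟩ := p
    simp only [List.map_cons, List.nodup_cons] at hnd
    obtain ⟨hk, hnd'⟩ := hnd
    by_cases hkv : k = v
    · subst hkv
      by_cases hc : c = cat
      · simp [hc]
      · have hnotin : ¬ k ∈ (List.map Prod.fst (rest.filter (fun p => p.2 == cat))) := by
          intro hmem
          exact hk (by
            obtain ⟨q, hq, hq2⟩ := List.mem_map.mp hmem
            exact List.mem_map.mpr ⟨q, (List.mem_filter.mp hq).1, hq2⟩)
        simp [hc, hnotin]
    · have hbv : (k == v) = false := beq_eq_false_iff_ne.mpr hkv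
      by_cases hc : c = cat
      · simp [hbv, hc, ih hnd']
        intro h
        exact absurd h.symm hkv
      · simp [hbv, hc, ih hnd']

lemma pvBridgeHvac (v : String) :
    PySem.Set.contains pvHvacBrands v = (pvDispatch.get? v == some "hvac_oems") := by
  have h := pvFindContains pvPairs v "hvac_oems" (by decide)
  have hf : (pvPairs.filter (fun p => p.2 == "hvac_oems")).map Prod.fst
      = ["Carrier", "Trane", "York", "Rheem", "Mitsubishi", "Mitsubishi Electric"] := by decide
  have hb : pvHvacBrands = ["Carrier", "Trane", "York", "Rheem", "Mitsubishi", "Mitsubishi Electric"] := by decide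
  rw [pvDispatch_eq]
  simp only [PySem.Dict.get?, PySem.Set.contains, hb, ← hf, ← h]

lemma pvBridgeSolar (v : String) :
    PySem.Set.contains pvSolarBrands v = (pvDispatch.get? v == some "solar_oems") := by
  have h := pvFindContains pvPairs v "solar_oems" (by decide)
  have hf : (pvPairs.filter (fun p => p.2 == "solar_oems")).map Prod.fst
      = ["Enphase", "SolarEdge", "SMA", "Fronius", "GoodWe", "Growatt", "Sungrow", "ABB", "Delta", "Tigo"] := by decide
  have hb : pvSolarBrands = ["Enphase", "SolarEdge", "SMA", "Fronius", "GoodWe", "Growatt", "Sungrow", "ABB", "Delta", "Tigo"] := by decide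
  rw [pvDispatch_eq]
  simp only [PySem.Dict.get?, PySem.Set.contains, hb, ← hf, ← h]

lemma pvBridgeBattery (v : String) :
    PySem.Set.contains pvBatteryBrands v = (pvDispatch.get? v == some "battery_oems") := by
  have h := pvFindContains pvPairs v "battery_oems" (by decide)
  have hf : (pvPairs.filter (fun p => p.2 == "battery_oems")).map Prod.fst
      = ["Tesla", "SimpliPhi", "Sol-Ark", "SolArk"] := by decide
  have hb : pvBatteryBrands = ["Tesla", "SimpliPhi", "Sol-Ark", "SolArk"] := by decide
  rw [pvDispatch_eq]
  simp only [PySem.Dict.get?, PySem.Set.contains, hb, ← hf, ← h]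

lemma pvBridgeGenerator (v : String) :
    PySem.Set.contains pvGeneratorBrands v = (pvDispatch.get? v == some "generator_oems") := by
  have h := pvFindContains pvPairs v "generator_oems" (by decide)
  have hf : (pvPairs.filter (fun p => p.2 == "generator_oems")).map Prod.fst
      = ["Generac", "Briggs & Stratton", "Cummins", "Kohler"] := by decide
  have hb : pvGeneratorBrands = ["Generac", "Briggs & Stratton", "Cummins", "Kohler"] := by decide
  rw [pvDispatch_eq]
  simp only [PySem.Dict.get?, PySem.Set.contains, hb, ← hf, ← h]

lemma pvBridgeSmartPanel (v : String) :
    PySem.Set.contains pvSmartPanelBrands v = (pvDispatch.get? v == some "smart_panel_oems") := by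
  have h := pvFindContains pvPairs v "smart_panel_oems" (by decide)
  have hf : (pvPairs.filter (fun p => p.2 == "smart_panel_oems")).map Prod.fst
      = ["Schneider Electric", "Schneider"] := by decide
  have hb : pvSmartPanelBrands = ["Schneider Electric", "Schneider"] := by decide
  rw [pvDispatch_eq]
  simp only [PySem.Dict.get?, PySem.Set.contains, hb, ← hf, ← h]

lemma pvDispatchVals (v cat : String) (hv : pvDispatch.get? v = some cat) :
    cat = "hvac_oems" ∨ cat = "solar_oems" ∨ cat = "battery_oems" ∨
    cat = "generator_oems" ∨ cat = "smart_panel_oems" := by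
  rw [pvDispatch_eq] at hv
  simp only [PySem.Dict.get?, Option.map_eq_some_iff] at hv
  obtain ⟨p, hp, hps⟩ := hv
  have hmem : p ∈ pvPairs := List.mem_of_find?_eq_some hp
  have hc : cat ∈ pvPairs.map Prod.snd := hps ▸ List.mem_map_of_mem hmem
  simp only [pvPairs, List.map_cons, List.map_nil, List.mem_cons, List.not_mem_nil, or_false] at hc
  tauto

lemma pvModifyHvac (hs ss bs gs ps : List String) (f : List String → List String) :
    (pvMkD hs ss bs gs ps).modify "hvac_oems" [] f = pvMkD (f hs) ss bs gs ps := by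
  simp [pvMkD, PySem.Dict.modify, PySem.Dict.insert, PySem.Dict.contains, PySem.Dict.getD,
    PySem.Dict.get?]

lemma pvModifySolar (hs ss bs gs ps : List String) (f : List String → List String) :
    (pvMkD hs ss bs gs ps).modify "solar_oems" [] f = pvMkD hs (f ss) bs gs ps := by
  simp [pvMkD, PySem.Dict.modify, PySem.Dict.insert, PySem.Dict.contains, PySem.Dict.getD,
    PySem.Dict.get?]

lemma pvModifyBattery (hs ss bs gs ps : List String) (f : List String → List String) :
    (pvMkD hs ss bs gs ps).modify "battery_oems" [] f = pvMkD hs ss (f bs) gs ps := by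
  simp [pvMkD, PySem.Dict.modify, PySem.Dict.insert, PySem.Dict.contains, PySem.Dict.getD,
    PySem.Dict.get?]

lemma pvModifyGenerator (hs ss bs gs ps : List String) (f : List String → List String) :
    (pvMkD hs ss bs gs ps).modify "generator_oems" [] f = pvMkD hs ss bs (f gs) ps := by
  simp [pvMkD, PySem.Dict.modify, PySem.Dict.insert, PySem.Dict.contains, PySem.Dict.getD,
    PySem.Dict.get?]

lemma pvModifySmartPanel (hs ss bs gs ps : List String) (f : List String → List String) :
    (pvMkD hs ss bs gs ps).modify "smart_panel_oems" [] f = pvMkD hs ss bs gs (f ps) := by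
  simp [pvMkD, PySem.Dict.modify, PySem.Dict.insert, PySem.Dict.contains, PySem.Dict.getD,
    PySem.Dict.get?]

lemma pvStep_eq (u : String) (hs ss bs gs ps : List String) :
    pvStep (pvMkD hs ss bs gs ps) u =
    pvMkD (hs ++ if PySem.Set.contains pvHvacBrands (PySem.Str.strip u) then [PySem.Str.strip u] else [])
          (ss ++ if PySem.Set.contains pvSolarBrands (PySem.Str.strip u) then [PySem.Str.strip u] else [])
          (bs ++ if PySem.Set.contains pvBatteryBrands (PySem.Str.strip u) then [PySem.Str.strip u] else [])
          (gs ++ if PySem.Set.contains pvGeneratorBrands (PySem.Str.strip u) then [PySem.Str.strip u] else [])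
          (ps ++ if PySem.Set.contains pvSmartPanelBrands (PySem.Str.strip u) then [PySem.Str.strip u] else []) := by
  unfold pvStep
  generalize PySem.Str.strip u = v
  simp only [pvBridgeHvac, pvBridgeSolar, pvBridgeBattery, pvBridgeGenerator, pvBridgeSmartPanel]
  rcases hv : pvDispatch.get? v with _ | cat
  · simp
  · rcases pvDispatchVals v cat hv with h | h | h | h | h <;> subst h <;>
      simp [pvModifyHvac, pvModifySolar, pvModifyBattery, pvModifyGenerator, pvModifySmartPanel]

lemma pvFold_inv (ts : List String) : ∀ (hs ss bs gs ps : List String),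
    ts.foldl pvStep (pvMkD hs ss bs gs ps) =
    pvMkD (hs ++ (ts.map PySem.Str.strip).filter (fun o => PySem.Set.contains pvHvacBrands o))
          (ss ++ (ts.map PySem.Str.strip).filter (fun o => PySem.Set.contains pvSolarBrands o))
          (bs ++ (ts.map PySem.Str.strip).filter (fun o => PySem.Set.contains pvBatteryBrands o))
          (gs ++ (ts.map PySem.Str.strip).filter (fun o => PySem.Set.contains pvGeneratorBrands o))
          (ps ++ (ts.map PySem.Str.strip).filter (fun o => PySem.Set.contains pvSmartPanelBrands o)) := by
  induction ts with
  | nil => intro hs ss bs gs ps; simp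
  | cons t ts ih =>
    intro hs ss bs gs ps
    simp only [List.foldl_cons, pvStep_eq, ih, List.map_cons, List.filter_cons, List.append_assoc]
    split_ifs <;> simp

-- ===== VERDICT (by name: the statement is the Claim_ definition above) =====
theorem categorize_oems_spec : Claim_equal_categorize_oems := by
  intro s _
  unfold Spec_categorize_oems categorize_oems categorize_oems_alt
  by_cases h : s = ""
  · subst h; decide
  · simp only [if_neg h]
    have hinit : PySem.Dict.ofList
        [("hvac_oems", ([] : List String)), ("solar_oems", []), ("battery_oems", []),
         ("generator_oems", []), ("smart_panel_oems", [])] = pvMkD [] [] [] [] [] := by decide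
    rw [hinit, pvFold_inv]
    simp only [pvMkD, List.nil_append]
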